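-- pv_equiv track=rewrite | github.com/miliar/Code_Jam_Webscraper | solutions_python/Problem_181/1755.py | last_word
-- ===== SOURCE A (Python) =====
-- from collections import deque
--
-- def last_word(word):
--   l = list(word)
--   o = deque()
--   o.append(l[0])
--
--   for c in l[1:]:
--     if c < o[0]:
--       o.append(c)
--     else:
--       o.appendleft(c)
--
--   return "".join(o)
-- ===== SOURCE B (Python) =====
-- def last_word(word):
--     maxes = [word[0]]
--     for c in word[1:]:
--         maxes.append(max(c, maxes[-1]))
--     pre = [c for c, m in zip(word[1:], maxes) if c >= m]
--     suf = [c for c, m in zip(word[1:], maxes) if c < m]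
--     return "".join(reversed(pre)) + word[0] + "".join(suf)
-- ===== Notes on version B (the rewrite author's own statement) =====
-- stated objective: alternative
-- what changed: Replaces the single-pass deque mutation by a staged algorithm built on the observation that the deque's front is always the running prefix maximum: B first computes the prefix-maxima list, then obtains the prepended and appended characters as two filters of zip(word[1:], maxes), and splices reversed(pre) + word[0] + suf.
import Mathlib
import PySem

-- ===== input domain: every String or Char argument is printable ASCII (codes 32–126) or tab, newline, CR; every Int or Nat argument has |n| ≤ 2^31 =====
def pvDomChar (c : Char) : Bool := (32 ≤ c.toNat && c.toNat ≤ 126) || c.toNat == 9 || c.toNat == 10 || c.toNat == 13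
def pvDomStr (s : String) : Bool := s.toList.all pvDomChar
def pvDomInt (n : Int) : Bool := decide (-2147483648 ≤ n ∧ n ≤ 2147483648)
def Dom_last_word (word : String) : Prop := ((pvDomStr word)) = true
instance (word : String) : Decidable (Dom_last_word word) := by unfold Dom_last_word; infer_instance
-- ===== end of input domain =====

-- B replaces the deque pass by a staged algorithm: the deque's front is the running
-- prefix maximum, so B computes the prefix-maxima list and then two filtered passes
-- (objective: alternative, same cost).

-- ===== PORT A =====
-- A: deque seeded with l[0]; each later char is appended right if c < o[0], else left.
def last_word (word : String) : String :=
  match word.toList with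
  | [] => ""   -- unreachable inside Pre_ (Python raises IndexError on l[0])
  | h :: t =>
    String.ofList (t.foldl (fun o c => if c < o.headD ' ' then o ++ [c] else c :: o) [h])

-- ===== PORT B =====
-- B: prefix-maxima list, then pre/suf as two filters of zip(word[1:], maxes),
-- spliced as reversed(pre) + word[0] + suf.
def last_word_alt (word : String) : String :=
  match word.toList with
  | [] => ""   -- unreachable inside Pre_ (Python raises IndexError on word[0])
  | h :: t =>
    let maxes := t.foldl (fun ms c => ms ++ [max c (ms.getLastD ' ')]) [h]
    let pre := ((t.zip maxes).filter (fun p => p.2 ≤ p.1)).map Prod.fst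
    let suf := ((t.zip maxes).filter (fun p => p.1 < p.2)).map Prod.fst
    String.ofList (pre.reverse ++ h :: suf)

-- ===== PRECONDITION & SPEC =====
-- Pre_ excludes only the empty string, on which both Pythons raise IndexError.
def Pre_last_word (word : String) : Prop := word ≠ ""
instance (word : String) : Decidable (Pre_last_word word) := by unfold Pre_last_word; infer_instance
def pvWitness_last_word : String := "cab"

def Spec_last_word (word : String) (out : String) : Prop := out = last_word_alt word
instance (word : String) (out : String) : Decidable (Spec_last_word word out) := by unfold Spec_last_word; infer_instance

-- ===== CLAIM (what is proved, stated in full; the proofs are below) =====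
def Claim_equal_last_word : Prop := ∀ (word : String), Dom_last_word word → Pre_last_word word → Spec_last_word word (last_word word)

-- ===== LEMMAS AND PROOFS =====

-- proof-internal: three-component fold (front-in-order, back, current front/max)
def pvFold3 (t : List Char) (s : List Char × List Char × Char) : List Char × List Char × Char :=
  t.foldl
    (fun (s : List Char × List Char × Char) c =>
      if c < s.2.2 then (s.1, s.2.1 ++ [c], s.2.2) else (s.1 ++ [c], s.2.1, c)) s

-- proof-internal recursive descriptions of the prepended / appended chars (occurrence order)
def pvPre (m : Char) : List Char → List Char
  | [] => []
  | c :: t => if c < m then pvPre m t else c :: pvPre (max c m) t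

def pvSuf (m : Char) : List Char → List Char
  | [] => []
  | c :: t => if c < m then c :: pvSuf m t else pvSuf (max c m) t

def pvPrefixMaxes (m : Char) : List Char → List Char
  | [] => [m]
  | c :: t => m :: pvPrefixMaxes (max c m) t

theorem headD_append_cons (l : List Char) (h0 : Char) (back : List Char) (d : Char) :
    (l ++ h0 :: back).headD d = (l ++ [h0]).headD d := by
  cases l <;> simp

-- loop invariant: A's deque is front.reverse ++ pivot ++ back and o[0] is the tracked head
theorem loop_inv (t : List Char) (front back : List Char) (h0 : Char) :
    t.foldl (fun o c => if c < o.headD ' ' then o ++ [c] else c :: o)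
      (front.reverse ++ h0 :: back)
    = (fun s : List Char × List Char × Char => s.1.reverse ++ h0 :: s.2.1)
        (pvFold3 t (front, back, (front.reverse ++ [h0]).headD ' ')) := by
  induction t generalizing front back with
  | nil => simp [pvFold3]
  | cons c t ih =>
    simp only [pvFold3, List.foldl_cons]
    rw [headD_append_cons]
    by_cases hc : c < (front.reverse ++ [h0]).headD ' '
    · simp only [if_pos hc]
      have : front.reverse ++ h0 :: back ++ [c] = front.reverse ++ h0 :: (back ++ [c]) := by
        simp
      rw [this, ih front (back ++ [c])]; rfl
    · simp only [if_neg hc]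
      have h1 : c :: (front.reverse ++ h0 :: back) = (front ++ [c]).reverse ++ h0 :: back := by
        simp
      have h2 : ((front ++ [c]).reverse ++ [h0]).headD ' ' = c := by simp
      rw [h1, ih (front ++ [c]) back, h2]; rfl

-- the fold collects exactly pvPre / pvSuf
theorem fold3_eq (t : List Char) (f b : List Char) (m : Char) :
    (pvFold3 t (f, b, m)).1 = f ++ pvPre m t ∧ (pvFold3 t (f, b, m)).2.1 = b ++ pvSuf m t := by
  induction t generalizing f b m with
  | nil => simp [pvFold3, pvPre, pvSuf]
  | cons c t ih =>
    simp only [pvFold3, List.foldl_cons] at *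
    by_cases hc : c < m
    · simp only [if_pos hc, pvPre, pvSuf]
      rcases ih f (b ++ [c]) m with ⟨h1, h2⟩
      exact ⟨h1, by simpa using h2⟩
    · have hm : max c m = c := max_eq_left (le_of_not_gt hc)
      simp only [if_neg hc, pvPre, pvSuf, hm]
      rcases ih (f ++ [c]) b c with ⟨h1, h2⟩
      exact ⟨by simpa using h1, h2⟩

-- B's maxes fold builds pvPrefixMaxes
theorem maxes_eq (t : List Char) (acc : List Char) (m : Char) :
    t.foldl (fun ms c => ms ++ [max c (ms.getLastD ' ')]) (acc ++ [m])
      = acc ++ pvPrefixMaxes m t := by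
  induction t generalizing acc m with
  | nil => simp [pvPrefixMaxes]
  | cons c t ih =>
    simp only [List.foldl_cons, List.getLastD_concat]
    have := ih (acc ++ [m]) (max c m)
    simpa [pvPrefixMaxes] using this

-- B's filters of the zip equal pvPre / pvSuf
theorem zip_filters (t : List Char) (m : Char) :
    (((t.zip (pvPrefixMaxes m t)).filter (fun p => p.2 ≤ p.1)).map Prod.fst = pvPre m t)
    ∧ (((t.zip (pvPrefixMaxes m t)).filter (fun p => p.1 < p.2)).map Prod.fst = pvSuf m t) := by
  induction t generalizing m with
  | nil => simp [pvPre, pvSuf]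
  | cons c t ih =>
    rcases ih (max c m) with ⟨h1, h2⟩
    by_cases hc : c < m
    · have hle : ¬ m ≤ c := not_le_of_gt hc
      have hm : max c m = m := max_eq_right (le_of_lt hc)
      simp only [pvPrefixMaxes, pvPre, pvSuf, List.zip_cons_cons, List.filter_cons]
      rw [hm] at h1 h2 ⊢
      simp [hle, hc, h1, h2]
    · have hle : m ≤ c := le_of_not_gt hc
      have hm : max c m = c := max_eq_left hle
      simp only [pvPrefixMaxes, pvPre, pvSuf, List.zip_cons_cons, List.filter_cons]
      rw [hm] at h1 h2 ⊢
      simp [hle, hc, h1, h2]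

-- ===== VERDICT (by name: the statement is the Claim_ definition above) =====
theorem last_word_spec : Claim_equal_last_word := by
  unfold Claim_equal_last_word
  intro word _ _
  unfold Spec_last_word last_word last_word_alt
  cases hw : word.toList with
  | nil => rfl
  | cons h t =>
    have hA := loop_inv t [] [] h
    simp only [List.reverse_nil, List.nil_append, List.headD_cons] at hA
    have hM := maxes_eq t [] h
    simp only [List.nil_append] at hM
    rcases fold3_eq t [] [] h with ⟨h1, h2⟩
    rcases zip_filters t h with ⟨z1, z2⟩
    simp only [hA, h1, h2, List.nil_append, hM, z1, z2]
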